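-- pv_equiv track=rewrite | github.com/D-hash/ILPCodonOptimization | ILPCodonOptimization.py | f_gc
-- ===== SOURCE A (Python) =====
-- def f_gc(sequence):
--     w = 30
--     total = 0
--     gc_ideal = 60
--     gc_max = 80
--     gc_min = 40
--     gc_pan = 3000
--     gc_diff = 200
--     for i in range(len(sequence) - w):
--         gc_local = sequence[i:i+w].count('G') + sequence[i:i+w].count('C')
--         total += (abs(gc_ideal - gc_local) * gc_diff) if gc_min <= gc_local <= gc_max else (abs(gc_ideal - gc_local) * gc_diff + gc_pan)
--     return total
-- ===== SOURCE B (Python) =====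
-- def f_gc(sequence):
--     w = 30
--     gc_ideal = 60
--     gc_max = 80
--     gc_min = 40
--     gc_pan = 3000
--     gc_diff = 200
--     pref = [0]
--     g = 0
--     for c in sequence:
--         if c == 'G' or c == 'C':
--             g += 1
--         pref.append(g)
--     total = 0
--     for i in range(len(sequence) - w):
--         gcw = pref[i + w] - pref[i]
--         pen = abs(gc_ideal - gcw) * gc_diff
--         total += pen if gc_min <= gcw <= gc_max else pen + gc_pan
--     return total
-- ===== Notes on version B (the rewrite author's own statement) =====
-- stated objective: faster
-- what changed: replaced the per-window slice-and-count rescans (O(n*w)) with a one-pass GC prefix-sum array, each window's GC count becoming one subtraction (O(n))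
import Mathlib
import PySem

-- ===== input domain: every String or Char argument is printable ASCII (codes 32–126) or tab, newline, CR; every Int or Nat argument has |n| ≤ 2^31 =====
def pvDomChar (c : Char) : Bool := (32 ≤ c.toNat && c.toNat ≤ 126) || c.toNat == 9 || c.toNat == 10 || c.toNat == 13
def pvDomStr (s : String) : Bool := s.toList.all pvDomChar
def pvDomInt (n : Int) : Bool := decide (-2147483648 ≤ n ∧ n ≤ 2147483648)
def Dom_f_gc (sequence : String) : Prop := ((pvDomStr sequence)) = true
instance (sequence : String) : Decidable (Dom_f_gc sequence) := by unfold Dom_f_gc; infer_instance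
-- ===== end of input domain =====

-- B replaces A's per-window slice-and-count rescans with a one-pass GC prefix-sum array (faster).

-- ===== PORT A =====
def f_gc (sequence : String) : Int :=
  (PySem.List.pyRange 0 (PySem.Str.len sequence - 30) 1).foldl
    (fun total i =>
      let win := PySem.Str.slice sequence (some i) (some (i + 30))
      let gc_local : Int := (PySem.Str.count win "G" : Int) + (PySem.Str.count win "C" : Int)
      total + (if 40 ≤ gc_local ∧ gc_local ≤ 80 then |60 - gc_local| * 200
               else |60 - gc_local| * 200 + 3000)) 0

-- ===== PORT B =====
def f_gc_alt (sequence : String) : Int :=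
  let st := sequence.toList.foldl
      (fun (st : List Int × Int) c =>
        let g := if c == 'G' || c == 'C' then st.2 + 1 else st.2
        (st.1 ++ [g], g)) ([0], 0)
  let pref := st.1
  (PySem.List.pyRange 0 (PySem.Str.len sequence - 30) 1).foldl
    (fun total i =>
      let gc : Int := PySem.List.pyGetD pref (i + 30) 0 - PySem.List.pyGetD pref i 0
      let pen := |60 - gc| * 200
      total + (if 40 ≤ gc ∧ gc ≤ 80 then pen else pen + 3000)) 0

-- ===== PRECONDITION & SPEC =====
def Spec_f_gc (sequence : String) (out : Int) : Prop := out = f_gc_alt sequence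
instance (sequence : String) (out : Int) : Decidable (Spec_f_gc sequence out) := by unfold Spec_f_gc; infer_instance

-- ===== CLAIM (what is proved, stated in full; the proofs are below) =====
def Claim_equal_f_gc : Prop := ∀ (sequence : String), Dom_f_gc sequence → Spec_f_gc sequence (f_gc sequence)

-- ===== LEMMAS AND PROOFS =====

def pvIsGC (c : Char) : Bool := c == 'G' || c == 'C'

theorem count_go_singleton (c : Char) (l : List Char) (fuel acc : Nat)
    (h : l.length ≤ fuel) : PySem.Chars.count.go [c] fuel l acc = acc + l.count c := by
  induction l generalizing fuel acc with
  | nil => cases fuel <;> simp [PySem.Chars.count.go]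
  | cons hd t ih =>
    cases fuel with
    | zero => simp at h
    | succ f =>
      simp only [PySem.Chars.count.go]
      by_cases hc : hd = c
      · subst hc
        simp only [List.isPrefixOf, beq_self_eq_true, Bool.true_and,
          if_true, List.length_cons, List.drop_succ_cons, List.drop_zero,
          List.length_nil]
        rw [ih f (acc + 1) (by simpa using h)]
        simp
        omega
      · have : List.isPrefixOf [c] (hd :: t) = false := by
          simp [List.isPrefixOf]
          exact fun hh => absurd hh.symm hc
        rw [this]
        simp only [if_false, Bool.false_eq_true]
        rw [ih f acc (by simpa using Nat.le_of_succ_le_succ h)]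
        simp [hc]

theorem count_singleton (c : Char) (l : List Char) :
    PySem.Chars.count l [c] = l.count c := by
  simp [PySem.Chars.count, count_go_singleton c l l.length 0 le_rfl]

theorem countGC_split (l : List Char) :
    l.count 'G' + l.count 'C' = l.countP pvIsGC := by
  induction l with
  | nil => simp
  | cons hd t ih =>
    simp only [List.count_cons, List.countP_cons, pvIsGC]
    by_cases h1 : hd = 'G' <;> by_cases h2 : hd = 'C' <;>
      simp [h1, h2] <;> omega

def pvStep (st : List Int × Int) (c : Char) : List Int × Int :=
  let g := if c == 'G' || c == 'C' then st.2 + 1 else st.2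
  (st.1 ++ [g], g)

theorem pref_fold_spec (cs : List Char) (p0 : List Int) (g0 : Int) :
    cs.foldl pvStep (p0, g0)
      = (p0 ++ (List.range cs.length).map
            (fun j => g0 + ((cs.take (j+1)).countP pvIsGC : Int)),
         g0 + (cs.countP pvIsGC : Int)) := by
  induction cs generalizing p0 g0 with
  | nil => simp
  | cons hd t ih =>
    simp only [List.foldl_cons]
    rw [show pvStep (p0, g0) hd
        = (p0 ++ [g0 + (if pvIsGC hd then 1 else 0 : Int)],
           g0 + (if pvIsGC hd then 1 else 0 : Int)) from by
      simp [pvStep, pvIsGC]; split_ifs <;> simp]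
    rw [ih]
    refine Prod.ext ?_ ?_
    · rw [List.length_cons, List.range_succ_eq_map]
      simp only [List.map_cons, List.map_map, List.append_assoc]
      congr 1
      simp only [List.take_succ_cons, List.countP_cons, List.singleton_append]
      congr 1
      · congr 1
        split_ifs <;> simp
      · apply List.map_congr_left
        intro j _
        simp only [Function.comp]
        split_ifs <;> push_cast <;> ring
    · simp only [List.countP_cons]
      split_ifs <;> push_cast <;> ring

theorem pref_eq (cs : List Char) :
    (cs.foldl pvStep ([0], 0)).1
      = (List.range (cs.length + 1)).map (fun m => ((cs.take m).countP pvIsGC : Int)) := by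
  rw [pref_fold_spec]
  rw [List.range_succ_eq_map]
  simp [List.map_map, Function.comp]

theorem pref_get (cs : List Char) (k : Nat) (hk : k ≤ cs.length) :
    PySem.List.pyGetD
        ((List.range (cs.length + 1)).map (fun m => ((cs.take m).countP pvIsGC : Int)))
        (k : Int) 0
      = ((cs.take k).countP pvIsGC : Int) := by
  rw [PySem.List.pyGetD_natCast]
  rw [PySem.List.getD_map_range]
  omega

theorem window_count (cs : List Char) (k : Nat) :
    ((cs.take (k + 30)).countP pvIsGC : Int) - ((cs.take k).countP pvIsGC : Int)
      = (((cs.drop k).take 30).countP pvIsGC : Int) := by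
  have h : cs.take (k + 30) = cs.take k ++ (cs.drop k).take 30 := List.take_add ..
  rw [h, List.countP_append]
  push_cast
  ring

-- ===== VERDICT (by name: the statement is the Claim_ definition above) =====
set_option maxHeartbeats 1000000 in
theorem f_gc_spec : Claim_equal_f_gc := by
  intro sequence _
  unfold Spec_f_gc f_gc f_gc_alt
  simp only []
  apply PySem.List.foldl_congr_mem
  intro acc i hi
  rw [PySem.List.mem_pyRange_one] at hi
  obtain ⟨h0, hlt⟩ := hi
  set cs := sequence.toList with hcs
  have hlen : PySem.Str.len sequence = (cs.length : Int) := by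
    simp [PySem.Str.len_eq, hcs]
  rw [hlen] at hlt
  obtain ⟨k, rfl⟩ : ∃ k : Nat, i = (k : Int) := ⟨i.toNat, (Int.toNat_of_nonneg h0).symm⟩
  have hk30 : k + 30 ≤ cs.length := by omega
  -- A's window count equals the prefix-sum difference
  have hwin : (PySem.Str.slice sequence (some (k : Int)) (some ((k : Int) + 30))).toList
      = (cs.drop k).take 30 := by
    rw [PySem.Str.toList_slice]
    simpa [hcs] using PySem.List.slice_natCast_add cs k 30
  have hfold : sequence.toList.foldl
      (fun (st : List Int × Int) c =>
        let g := if c == 'G' || c == 'C' then st.2 + 1 else st.2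
        (st.1 ++ [g], g)) ([0], 0) = cs.foldl pvStep ([0], 0) := rfl
  rw [hfold]
  congr 1
  have hA : (PySem.Str.count (PySem.Str.slice sequence (some (k : Int)) (some ((k : Int) + 30))) "G" : Int)
      + (PySem.Str.count (PySem.Str.slice sequence (some (k : Int)) (some ((k : Int) + 30))) "C" : Int)
      = (((cs.drop k).take 30).countP pvIsGC : Int) := by
    simp only [PySem.Str.count, hwin]
    have hg : ("G" : String).toList = ['G'] := rfl
    have hc : ("C" : String).toList = ['C'] := rfl
    rw [hg, hc, count_singleton, count_singleton]
    rw [← countGC_split]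
    push_cast
    ring
  have hB : PySem.List.pyGetD (cs.foldl pvStep ([0], 0)).1 ((k : Int) + 30) 0
      - PySem.List.pyGetD (cs.foldl pvStep ([0], 0)).1 (k : Int) 0
      = (((cs.drop k).take 30).countP pvIsGC : Int) := by
    rw [pref_eq]
    have h30 : ((k : Int) + 30) = ((k + 30 : Nat) : Int) := by push_cast; ring
    rw [h30, pref_get cs (k + 30) hk30, pref_get cs k (by omega)]
    exact window_count cs k
  rw [hA, hB]
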